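-- pv_equiv track=rewrite | github.com/sgeisenh/aoc2021 | python/19.py | applyFacing
-- ===== SOURCE A (Python) =====
-- def applyFacing(facing, scanner):
--   if facing == 'forward':
--     return scanner
--   elif facing == 'back':
--     return [(-x, y, -z) for x, y, z in scanner]
--   elif facing == 'up':
--     return [(x, -z, y) for x, y, z in scanner]
--   elif facing == 'down':
--     return [(x, z, -y) for x, y, z in scanner]
--   elif facing == 'left':
--     return [(z, y, -x) for x, y, z in scanner]
--   elif facing == 'right':
--     return [(-z, y, x) for x, y, z in scanner]
--   assert(False)
-- ===== SOURCE B (Python) =====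
-- # Each facing is a power of one of two quarter-turn generators:
-- # yaw (about y): (x,y,z) -> (z,y,-x); pitch (about x): (x,y,z) -> (x,-z,y).
-- STEPS = {
--     'forward': ('y', 0),
--     'left':    ('y', 1),
--     'back':    ('y', 2),
--     'right':   ('y', 3),
--     'up':      ('x', 1),
--     'down':    ('x', 3),
-- }
--
--
-- def applyFacing(facing, scanner):
--     step = STEPS.get(facing)
--     assert step is not None
--     axis, k = step
--     pts = scanner
--     for _ in range(k):
--         if axis == 'y':
--             pts = [(z, y, -x) for x, y, z in pts]
--         else:
--             pts = [(x, -z, y) for x, y, z in pts]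
--     return pts
-- ===== Notes on version B (the rewrite author's own statement) =====
-- stated objective: alternative
-- what changed: Replaces six hardcoded one-shot coordinate transforms by a table of powers of two quarter-turn generators (yaw about y, pitch about x), applying the generator k times in staged passes over the points.
import Mathlib
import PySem

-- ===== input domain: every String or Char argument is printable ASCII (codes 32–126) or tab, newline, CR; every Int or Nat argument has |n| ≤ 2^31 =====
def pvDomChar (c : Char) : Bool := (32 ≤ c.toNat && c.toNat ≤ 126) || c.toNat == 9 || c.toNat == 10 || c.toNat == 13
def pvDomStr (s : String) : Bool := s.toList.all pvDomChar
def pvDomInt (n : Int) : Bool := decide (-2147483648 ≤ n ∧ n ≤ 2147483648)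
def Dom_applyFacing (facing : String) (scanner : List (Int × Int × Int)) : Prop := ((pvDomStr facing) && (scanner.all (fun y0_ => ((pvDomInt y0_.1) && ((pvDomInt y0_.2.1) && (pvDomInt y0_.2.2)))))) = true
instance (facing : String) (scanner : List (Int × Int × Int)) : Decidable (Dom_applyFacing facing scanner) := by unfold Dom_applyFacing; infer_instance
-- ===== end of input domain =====

-- B rewrites A's six hardcoded one-shot transforms as iterated powers of two quarter-turn
-- generators (yaw about y, pitch about x), applied in staged passes; same O(n) cost.
-- Return value only: A's 'forward' branch returns the input list object itself.

-- ===== PORT A =====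
def applyFacing (facing : String) (scanner : List (Int × Int × Int)) : List (Int × Int × Int) :=
  if facing = "forward" then scanner
  else if facing = "back" then scanner.map (fun p => (-p.1, p.2.1, -p.2.2))
  else if facing = "up" then scanner.map (fun p => (p.1, -p.2.2, p.2.1))
  else if facing = "down" then scanner.map (fun p => (p.1, p.2.2, -p.2.1))
  else if facing = "left" then scanner.map (fun p => (p.2.2, p.2.1, -p.1))
  else if facing = "right" then scanner.map (fun p => (-p.2.2, p.2.1, p.1))
  else []  -- assert(False): AssertionError, excluded by Pre_applyFacing

-- ===== PORT B =====
def pvSteps : PySem.Dict String (String × Int) :=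
  PySem.Dict.ofList
    [ ("forward", ("y", 0))
    , ("left",    ("y", 1))
    , ("back",    ("y", 2))
    , ("right",   ("y", 3))
    , ("up",      ("x", 1))
    , ("down",    ("x", 3)) ]

def applyFacing_alt (facing : String) (scanner : List (Int × Int × Int)) : List (Int × Int × Int) :=
  match PySem.Dict.get? pvSteps facing with
  | none => []  -- assert step is not None: AssertionError, excluded by Pre_applyFacing
  | some (axis, k) =>
      (List.range k.toNat).foldl
        (fun pts _ =>
          if axis = "y" then pts.map (fun p => (p.2.2, p.2.1, -p.1))
          else pts.map (fun p => (p.1, -p.2.2, p.2.1)))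
        scanner

-- ===== PRECONDITION & SPEC =====
-- Pre_ excludes exactly the facings on which both A and B raise AssertionError.
def Pre_applyFacing (facing : String) (_scanner : List (Int × Int × Int)) : Prop :=
  facing = "forward" ∨ facing = "back" ∨ facing = "up" ∨ facing = "down" ∨
  facing = "left" ∨ facing = "right"
instance (facing : String) (scanner : List (Int × Int × Int)) : Decidable (Pre_applyFacing facing scanner) := by unfold Pre_applyFacing; infer_instance
def pvWitness_applyFacing : String × (List (Int × Int × Int)) := ("up", [(1, 2, 3), (-4, 0, 7)])

def Spec_applyFacing (facing : String) (scanner : List (Int × Int × Int)) (out : List (Int × Int × Int)) : Prop := out = applyFacing_alt facing scanner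
instance (facing : String) (scanner : List (Int × Int × Int)) (out : List (Int × Int × Int)) : Decidable (Spec_applyFacing facing scanner out) := by unfold Spec_applyFacing; infer_instance

-- ===== CLAIM (what is proved, stated in full; the proofs are below) =====
def Claim_equal_applyFacing : Prop := ∀ (facing : String) (scanner : List (Int × Int × Int)), Dom_applyFacing facing scanner → Pre_applyFacing facing scanner → Spec_applyFacing facing scanner (applyFacing facing scanner)

-- ===== LEMMAS AND PROOFS =====

-- ===== VERDICT (by name: the statement is the Claim_ definition above) =====
theorem applyFacing_spec : Claim_equal_applyFacing := by
  intro facing scanner _ hpre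
  unfold Spec_applyFacing
  rcases hpre with h | h | h | h | h | h <;> subst h
  · have h : PySem.Dict.get? pvSteps "forward" = some ("y", 0) := by decide
    have hk : (0 : Int).toNat = 0 := rfl
    simp [applyFacing, applyFacing_alt, h, hk]
  · have h : PySem.Dict.get? pvSteps "back" = some ("y", 2) := by decide
    have hk : (2 : Int).toNat = 2 := rfl
    simp [applyFacing, applyFacing_alt, h, hk, List.range_succ, List.map_map, Function.comp_def]
  · have h : PySem.Dict.get? pvSteps "up" = some ("x", 1) := by decide
    have hk : (1 : Int).toNat = 1 := rfl
    simp [applyFacing, applyFacing_alt, h, hk, List.range_succ]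
  · have h : PySem.Dict.get? pvSteps "down" = some ("x", 3) := by decide
    have hk : (3 : Int).toNat = 3 := rfl
    simp [applyFacing, applyFacing_alt, h, hk, List.range_succ, List.map_map, Function.comp_def]
  · have h : PySem.Dict.get? pvSteps "left" = some ("y", 1) := by decide
    have hk : (1 : Int).toNat = 1 := rfl
    simp [applyFacing, applyFacing_alt, h, hk, List.range_succ]
  · have h : PySem.Dict.get? pvSteps "right" = some ("y", 3) := by decide
    have hk : (3 : Int).toNat = 3 := rfl
    simp [applyFacing, applyFacing_alt, h, hk, List.range_succ, List.map_map, Function.comp_def]
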